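-- pv_equiv track=rewrite | github.com/arlex13/migrantes | api/viewsets/estadisticas.py | __obtener_dato_mes
-- ===== SOURCE A (Python) =====
-- MESES = [1,2,3,4,5,6,7,8,9,10,11,12]
--
-- def __obtener_dato_mes(lista_datos):
--   datos_meses = []
--   for mes in MESES:
--     dato_mes = 0
--     for dato in lista_datos:
--       if dato['mes'] == mes:
--         dato_mes = dato['conteo']
--
--     datos_meses.append(dato_mes)
--   return datos_meses
-- ===== SOURCE B (Python) =====
-- MESES = [1,2,3,4,5,6,7,8,9,10,11,12]
--
-- def __obtener_dato_mes(lista_datos):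
--   res = [0] * 12
--   for dato in lista_datos:
--     mes = dato['mes']
--     if 1 <= mes <= 12:
--       res[mes - 1] = dato['conteo']
--   return res
-- ===== Notes on version B (the rewrite author's own statement) =====
-- stated objective: faster
-- what changed: Replaces A's 12 repeated scans of lista_datos (one inner loop per month keeping the last match) by a single pass over lista_datos that writes each entry's conteo directly into slot mes-1 of a fixed 12-element result array; last write wins, untouched slots stay 0.
import Mathlib
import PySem

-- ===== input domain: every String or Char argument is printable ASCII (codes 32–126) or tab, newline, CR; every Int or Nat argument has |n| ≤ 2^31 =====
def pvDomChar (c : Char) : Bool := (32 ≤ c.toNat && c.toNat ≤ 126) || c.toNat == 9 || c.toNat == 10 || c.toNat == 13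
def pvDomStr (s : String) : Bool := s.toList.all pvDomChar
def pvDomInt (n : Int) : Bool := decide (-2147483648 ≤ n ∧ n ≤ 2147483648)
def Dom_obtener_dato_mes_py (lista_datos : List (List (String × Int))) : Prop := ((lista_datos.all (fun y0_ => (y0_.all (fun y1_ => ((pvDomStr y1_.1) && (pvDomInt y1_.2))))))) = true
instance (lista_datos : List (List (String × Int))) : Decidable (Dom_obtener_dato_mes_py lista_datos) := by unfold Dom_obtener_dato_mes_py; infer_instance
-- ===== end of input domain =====

-- B replaces A's 12 per-month scans by one pass writing into a fixed 12-slot result list (objective: faster, constant-factor).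

-- ===== PORT A =====
def MESES_py : List Int := [1, 2, 3, 4, 5, 6, 7, 8, 9, 10, 11, 12]

-- inner loop body of A: 'if dato['mes'] == mes: dato_mes = dato['conteo']'
def pvA_inner (mes : Int) (dato_mes : Int) (dato : List (String × Int)) : Int :=
  if (PySem.Dict.mk dato).get? "mes" = some mes then (PySem.Dict.mk dato).getD "conteo" 0
  else dato_mes

def obtener_dato_mes_py (lista_datos : List (List (String × Int))) : List Int :=
  MESES_py.foldl (fun datos_meses mes =>
    datos_meses ++ [lista_datos.foldl (pvA_inner mes) 0]) []

-- ===== PORT B =====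
-- loop body of B: 'mes = dato['mes']; if 1 <= mes <= 12: res[mes-1] = dato['conteo']'
-- (mes - 1).toNat is exact here: the guard ensures 0 ≤ mes - 1 ≤ 11, so no clamping/wrap occurs.
def pvB_write (res : List Int) (dato : List (String × Int)) : List Int :=
  match (PySem.Dict.mk dato).get? "mes" with
  | some mes =>
      if 1 ≤ mes ∧ mes ≤ 12 then res.set (mes - 1).toNat ((PySem.Dict.mk dato).getD "conteo" 0)
      else res
  | none => res

def obtener_dato_mes_py_alt (lista_datos : List (List (String × Int))) : List Int :=
  lista_datos.foldl pvB_write (List.replicate 12 0)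

-- ===== PRECONDITION & SPEC =====
-- Pre_ excludes exactly the inputs where the Python raises KeyError: a dict without key 'mes',
-- or a dict whose 'mes' value is one of MESES but which lacks key 'conteo'.
def Pre_obtener_dato_mes_py (lista_datos : List (List (String × Int))) : Prop :=
  (lista_datos.all (fun dato =>
    match (PySem.Dict.mk dato).get? "mes" with
    | some mes => !MESES_py.contains mes || ((PySem.Dict.mk dato).get? "conteo").isSome
    | none => false)) = true
instance (lista_datos : List (List (String × Int))) : Decidable (Pre_obtener_dato_mes_py lista_datos) := by
  unfold Pre_obtener_dato_mes_py; infer_instance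

def pvWitness_obtener_dato_mes_py : (List (List (String × Int))) :=
  [[("mes", 3), ("conteo", 7)], [("mes", 20)], [("mes", 3), ("conteo", 9)]]

def Spec_obtener_dato_mes_py (lista_datos : List (List (String × Int))) (out : List Int) : Prop := out = obtener_dato_mes_py_alt lista_datos
instance (lista_datos : List (List (String × Int))) (out : List Int) : Decidable (Spec_obtener_dato_mes_py lista_datos out) := by unfold Spec_obtener_dato_mes_py; infer_instance

-- ===== CLAIM (what is proved, stated in full; the proofs are below) =====
def Claim_equal_obtener_dato_mes_py : Prop := ∀ (lista_datos : List (List (String × Int))), Dom_obtener_dato_mes_py lista_datos → Pre_obtener_dato_mes_py lista_datos → Spec_obtener_dato_mes_py lista_datos (obtener_dato_mes_py lista_datos)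

-- ===== LEMMAS AND PROOFS =====

theorem pvB_length (l : List (List (String × Int))) :
    ∀ res : List Int, (l.foldl pvB_write res).length = res.length := by
  induction l with
  | nil => intro res; rfl
  | cons d l ih =>
      intro res
      rw [List.foldl_cons, ih]
      unfold pvB_write
      split
      · split <;> simp
      · rfl

-- the per-slot invariant: slot j of B's accumulator evolves exactly as A's inner fold for month j+1
theorem pvSlot_inv (j : Nat) (hj : j < 12) (l : List (List (String × Int))) :
    ∀ res : List Int, res.length = 12 →
      (l.foldl pvB_write res).getD j 0 = l.foldl (pvA_inner ((j : Int) + 1)) (res.getD j 0) := by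
  induction l with
  | nil => intro res _; rfl
  | cons d l ih =>
      intro res hlen
      rw [List.foldl_cons, List.foldl_cons]
      have hlen' : (pvB_write res d).length = 12 := by
        unfold pvB_write
        split
        · split <;> simp [hlen]
        · exact hlen
      rw [ih (pvB_write res d) hlen']
      congr 1
      unfold pvB_write pvA_inner
      cases hg : (PySem.Dict.mk d).get? "mes" with
      | none => simp
      | some m =>
          by_cases hm : m = (j : Int) + 1
          · subst hm
            have hrange : 1 ≤ (j : Int) + 1 ∧ (j : Int) + 1 ≤ 12 := by omega
            simp [hrange, List.getD, hlen, hj]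

          · have hne : ¬ ((some m : Option Int) = some ((j : Int) + 1)) := by
              simp [hm]
            by_cases hr : 1 ≤ m ∧ m ≤ 12
            · have hne' : m.toNat - 1 ≠ j := by omega
              simp [hr, hne, List.getD, List.getElem?_set_ne, hne']
            · simp [hr, hne]

theorem pvFoldl_append_map {α β : Type} (g : α → β) :
    ∀ (ms : List α) (acc : List β),
      ms.foldl (fun acc m => acc ++ [g m]) acc = acc ++ ms.map g := by
  intro ms
  induction ms with
  | nil => intro acc; simp
  | cons m ms ih => intro acc; simp [ih]

theorem pvMESES_get (i : Nat) (hi : i < 12) : MESES_py.getD i 0 = (i : Int) + 1 := by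
  interval_cases i <;> rfl

-- ===== VERDICT (by name: the statement is the Claim_ definition above) =====
theorem obtener_dato_mes_py_spec : Claim_equal_obtener_dato_mes_py := by
  intro l _ _
  unfold Spec_obtener_dato_mes_py obtener_dato_mes_py obtener_dato_mes_py_alt
  rw [pvFoldl_append_map]
  simp only [List.nil_append]
  have hlen : (l.foldl pvB_write (List.replicate 12 0)).length = 12 := by
    rw [pvB_length]; simp
  apply List.ext_getElem
  · rw [hlen]; simp [MESES_py]
  · intro i hi hi'
    have hi12 : i < 12 := hlen ▸ hi'
    have hiM : i < MESES_py.length := by simpa [MESES_py] using hi12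
    rw [List.getElem_map]
    rw [← List.getD_eq_getElem MESES_py 0 hiM, pvMESES_get i hi12]
    rw [← List.getD_eq_getElem _ 0 hi',
      pvSlot_inv i hi12 l (List.replicate 12 0) (by simp)]
    simp only [List.getD]
    congr 1
    interval_cases i <;> rfl
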